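-- pv_equiv track=rewrite | github.com/DragnSlav3/MisionTIC-2022-Universidad-Nacional-de-Colombia | Ciclo 1/Retos/Reto_5/inventarios.py | consulta_posiciones_x_producto
-- ===== SOURCE A (Python) =====
-- def consulta_posiciones_x_producto(lista_indices, lista_productos, nombre_producto):
--     indices_coincidentes = []
--     for i in range(len(lista_productos)):
--         if lista_productos[i] == nombre_producto:
--             indices_coincidentes.append(i)
--
--     lista_salida = []
--     for i in lista_indices:
--         for j in indices_coincidentes:
--             if i == j:
--                 lista_salida.append(i)
--     return lista_salida
-- ===== SOURCE B (Python) =====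
-- def consulta_posiciones_x_producto(lista_indices, lista_productos, nombre_producto):
--     n = len(lista_productos)
--     return [i for i in lista_indices
--             if 0 <= i < n and lista_productos[i] == nombre_producto]
-- ===== Notes on version B (the rewrite author's own statement) =====
-- stated objective: simpler
-- what changed: Replaced the precomputed matching-position table and the nested membership loop by a single pass over lista_indices that keeps i when it is an in-range position whose product equals nombre_producto.
import Mathlib
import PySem

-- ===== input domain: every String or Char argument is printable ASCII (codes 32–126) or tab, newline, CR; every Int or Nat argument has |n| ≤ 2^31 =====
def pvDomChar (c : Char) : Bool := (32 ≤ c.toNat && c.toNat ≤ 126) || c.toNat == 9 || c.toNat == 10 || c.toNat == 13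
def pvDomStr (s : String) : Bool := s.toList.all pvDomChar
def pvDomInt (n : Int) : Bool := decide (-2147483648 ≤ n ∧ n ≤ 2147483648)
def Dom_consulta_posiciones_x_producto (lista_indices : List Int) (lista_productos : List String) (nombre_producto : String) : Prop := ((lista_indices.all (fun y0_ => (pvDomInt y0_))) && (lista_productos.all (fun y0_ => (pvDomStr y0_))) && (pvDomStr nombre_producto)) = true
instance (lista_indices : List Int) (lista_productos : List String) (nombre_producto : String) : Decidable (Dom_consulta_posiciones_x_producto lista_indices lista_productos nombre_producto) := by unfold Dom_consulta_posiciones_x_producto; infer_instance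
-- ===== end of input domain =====

-- ===== PORT A =====
-- B drops A's matching-position table and nested loop for one filtering pass (simpler; same result).
def consulta_posiciones_x_producto (lista_indices : List Int) (lista_productos : List String) (nombre_producto : String) : List Int :=
  let indices_coincidentes : List Int :=
    (PySem.List.pyRange 0 (lista_productos.length : Int) 1).foldl
      (fun acc i => if PySem.List.pyGetD lista_productos i "" == nombre_producto then acc ++ [i] else acc) []
  lista_indices.foldl
    (fun acc i => indices_coincidentes.foldl
      (fun acc2 j => if i == j then acc2 ++ [i] else acc2) acc) []

-- ===== PORT B =====
def consulta_posiciones_x_producto_alt (lista_indices : List Int) (lista_productos : List String) (nombre_producto : String) : List Int :=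
  let n : Int := lista_productos.length
  lista_indices.filter
    (fun i => decide (0 ≤ i) && decide (i < n) && (PySem.List.pyGetD lista_productos i "" == nombre_producto))

-- ===== PRECONDITION & SPEC =====
def Spec_consulta_posiciones_x_producto (lista_indices : List Int) (lista_productos : List String) (nombre_producto : String) (out : List Int) : Prop := out = consulta_posiciones_x_producto_alt lista_indices lista_productos nombre_producto
instance (lista_indices : List Int) (lista_productos : List String) (nombre_producto : String) (out : List Int) : Decidable (Spec_consulta_posiciones_x_producto lista_indices lista_productos nombre_producto out) := by unfold Spec_consulta_posiciones_x_producto; infer_instance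

-- ===== CLAIM (what is proved, stated in full; the proofs are below) =====
def Claim_equal_consulta_posiciones_x_producto : Prop := ∀ (lista_indices : List Int) (lista_productos : List String) (nombre_producto : String), Dom_consulta_posiciones_x_producto lista_indices lista_productos nombre_producto → Spec_consulta_posiciones_x_producto lista_indices lista_productos nombre_producto (consulta_posiciones_x_producto lista_indices lista_productos nombre_producto)

-- ===== LEMMAS AND PROOFS =====

-- ===== VERDICT (by name: the statement is the Claim_ definition above) =====
theorem pv_filter_eq_nil_of_not_mem {i : Int} {t : List Int} (ha : i ∉ t) :
    t.filter (fun j => i == j) = [] := by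
  rw [List.filter_eq_nil_iff]
  intro a hat heq
  exact ha ((beq_iff_eq.mp heq) ▸ hat)

-- filtering a duplicate-free list by equality with i yields [i] or []
theorem pv_filter_beq_of_nodup (l : List Int) (hl : l.Nodup) (i : Int) :
    l.filter (fun j => i == j) = if i ∈ l then [i] else [] := by
  induction l with
  | nil => simp
  | cons a t ih =>
    rcases List.nodup_cons.mp hl with ⟨ha, ht⟩
    by_cases hia : i = a
    · subst hia
      simp [ha, pv_filter_eq_nil_of_not_mem ha]
    · simp [hia, ih ht]

theorem consulta_posiciones_x_producto_eq (lista_indices : List Int) (lista_productos : List String) (nombre_producto : String) :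
    consulta_posiciones_x_producto lista_indices lista_productos nombre_producto =
      consulta_posiciones_x_producto_alt lista_indices lista_productos nombre_producto := by
  unfold consulta_posiciones_x_producto consulta_posiciones_x_producto_alt
  set n : Int := (lista_productos.length : Int) with hn
  set p : Int → Bool := fun i => PySem.List.pyGetD lista_productos i "" == nombre_producto with hp
  have hco : (PySem.List.pyRange 0 n 1).foldl
      (fun acc i => if p i then acc ++ [i] else acc) [] = (PySem.List.pyRange 0 n 1).filter p := by
    simpa using PySem.List.foldl_append_if_eq_filter p (PySem.List.pyRange 0 n 1) []
  rw [hco]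
  set co : List Int := (PySem.List.pyRange 0 n 1).filter p with hcodef
  have hnodup : co.Nodup := (PySem.List.nodup_pyRange_one 0 n).filter p
  have hmem : ∀ i : Int, (i ∈ co) ↔ (0 ≤ i ∧ i < n ∧ p i = true) := by
    intro i
    simp [hcodef, List.mem_filter, PySem.List.mem_pyRange_one, and_assoc]
  have hinner : ∀ (acc : List Int) (i : Int),
      co.foldl (fun acc2 j => if i == j then acc2 ++ [i] else acc2) acc
        = acc ++ (if i ∈ co then [i] else []) := by
    intro acc i
    have := PySem.List.foldl_append_if (fun j => i == j) (fun _ => i) co acc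
    rw [this, pv_filter_beq_of_nodup co hnodup i]
    by_cases h : i ∈ co <;> simp [h]
  have houter : lista_indices.foldl
      (fun acc i => co.foldl (fun acc2 j => if i == j then acc2 ++ [i] else acc2) acc) []
        = lista_indices.filter (fun i => decide (i ∈ co)) := by
    have hfun : (fun (acc : List Int) (i : Int) =>
        co.foldl (fun acc2 j => if i == j then acc2 ++ [i] else acc2) acc)
          = fun acc i => if i ∈ co then acc ++ [i] else acc := by
      funext acc i
      rw [hinner]
      by_cases h : i ∈ co <;> simp [h]
    rw [hfun]
    simpa using PySem.List.foldl_append_ite_eq_filter (fun i => i ∈ co) lista_indices []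
  rw [houter]
  apply List.filter_congr
  intro i _
  by_cases h : i ∈ co
  · obtain ⟨h1, h2, h3⟩ := (hmem i).mp h
    simp [h, h1, h2]
    exact beq_iff_eq.mp h3
  · have hne := (hmem i).not.mp h
    simp only [h, decide_false]
    rcases Decidable.not_and_iff_or_not.mp hne with h1 | h2
    · simp [h1]
    · rcases Decidable.not_and_iff_or_not.mp h2 with h3 | h4
      · simp [h3]
      · simp
        intro _ _ hc
        exact h4 (beq_iff_eq.mpr hc)

theorem consulta_posiciones_x_producto_spec : Claim_equal_consulta_posiciones_x_producto := by
  intro li lp np _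
  exact consulta_posiciones_x_producto_eq li lp np
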